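-- pv_equiv track=rewrite | github.com/tanishqjasoria/python_prac | p13.py | rm_common
-- ===== SOURCE A (Python) =====
-- def rm_common(arra,arrb):
-- 	unique=[]
-- 	for i in range(len(arra)):
-- 		if arra[:i+1].count(arra[i]) > arrb.count(arra[i]):
-- 			unique.append(arra[i])
-- 	for i in range(len(arrb)):
-- 		if arrb[:i+1].count(arrb[i]) > arra.count(arrb[i]):
-- 			unique.append(arrb[i])
-- 	return len(unique)
-- ===== SOURCE B (Python) =====
-- def rm_common(arra, arrb):
--     # Greedy consumption: one pass over arra consuming matches from a copy of arrb;
--     # unmatched elements of arra plus leftovers of arrb are exactly the symmetric-difference count.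
--     b = list(arrb)
--     count = 0
--     for x in arra:
--         if x in b:
--             b.remove(x)
--         else:
--             count += 1
--     return count + len(b)
-- ===== Notes on version B (the rewrite author's own statement) =====
-- stated objective: alternative
-- what changed: Replaces A's double pass of prefix-slice counts plus full counts per index by a single greedy pass over arra that consumes first matches from a copy of arrb, returning unmatched count plus leftovers.
import Mathlib
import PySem

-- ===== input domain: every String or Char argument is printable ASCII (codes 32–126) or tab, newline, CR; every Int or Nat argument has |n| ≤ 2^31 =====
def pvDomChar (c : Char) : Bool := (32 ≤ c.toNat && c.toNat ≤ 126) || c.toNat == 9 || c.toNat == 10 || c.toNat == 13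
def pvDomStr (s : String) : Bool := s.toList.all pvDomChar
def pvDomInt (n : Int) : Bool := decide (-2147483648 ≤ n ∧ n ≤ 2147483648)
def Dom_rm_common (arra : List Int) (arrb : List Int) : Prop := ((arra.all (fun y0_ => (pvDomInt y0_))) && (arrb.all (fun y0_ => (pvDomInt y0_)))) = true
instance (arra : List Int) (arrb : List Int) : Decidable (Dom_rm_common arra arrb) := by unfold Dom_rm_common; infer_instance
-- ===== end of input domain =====

-- B replaces A's two index loops with prefix-slice counts by a single greedy pass over arra
-- consuming first matches from a copy of arrb (alternative algorithm, same return value).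

-- ===== PORT A =====
-- unique = []; two index loops appending to it; return len(unique)
def rm_common (arra : List Int) (arrb : List Int) : Int :=
  PySem.List.len
    ((PySem.List.pyRange 0 (PySem.List.len arrb) 1).foldl
      (fun u i =>
        if PySem.List.count (PySem.List.slice arrb none (some (i + 1))) (PySem.List.pyGetD arrb i 0) >
             PySem.List.count arra (PySem.List.pyGetD arrb i 0)
        then u ++ [PySem.List.pyGetD arrb i 0] else u)
      ((PySem.List.pyRange 0 (PySem.List.len arra) 1).foldl
        (fun u i =>
          if PySem.List.count (PySem.List.slice arra none (some (i + 1))) (PySem.List.pyGetD arra i 0) >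
               PySem.List.count arrb (PySem.List.pyGetD arra i 0)
          then u ++ [PySem.List.pyGetD arra i 0] else u) []))

-- ===== PORT B =====
def rm_common_alt (arra : List Int) (arrb : List Int) : Int :=
  let st := arra.foldl
    (fun (st : Int × List Int) x =>
      match PySem.List.remove? st.2 x with
      | some b' => (st.1, b')            -- x in b: b.remove(x)
      | none => (st.1 + 1, st.2))        -- else: count += 1
    (0, arrb)
  st.1 + PySem.List.len st.2

-- ===== PRECONDITION & SPEC =====
def Spec_rm_common (arra : List Int) (arrb : List Int) (out : Int) : Prop := out = rm_common_alt arra arrb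
instance (arra : List Int) (arrb : List Int) (out : Int) : Decidable (Spec_rm_common arra arrb out) := by unfold Spec_rm_common; infer_instance

-- ===== CLAIM (what is proved, stated in full; the proofs are below) =====
def Claim_equal_rm_common : Prop := ∀ (arra : List Int) (arrb : List Int), Dom_rm_common arra arrb → Spec_rm_common arra arrb (rm_common arra arrb)

-- ===== LEMMAS AND PROOFS =====

-- number of indices k of l whose prefix count l[:k+1].count(l[k]) exceeds c l[k]
def pvCountQ (l : List Int) (c : Int → Nat) : Nat :=
  (List.range l.length).countP
    (fun k => decide (c (l.getD k 0) < (l.take (k + 1)).count (l.getD k 0)))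

-- the leftover of b after greedily erasing a first match of each element of a
def pvRem (a b : List Int) : List Int := a.foldl (fun r x => r.erase x) b

lemma pvCountQ_nil (c : Int → Nat) : pvCountQ [] c = 0 := rfl

lemma pvCountQ_append (l : List Int) (x : Int) (c : Int → Nat) :
    pvCountQ (l ++ [x]) c = pvCountQ l c + (if c x < l.count x + 1 then 1 else 0) := by
  unfold pvCountQ
  rw [List.length_append, List.length_singleton, List.range_succ, List.countP_append]
  congr 1
  · apply List.countP_congr
    intro k hk
    rw [List.mem_range] at hk
    have h1 : (l ++ [x]).getD k 0 = l.getD k 0 := by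
      simp [List.getD_eq_getElem?_getD, List.getElem?_append_left hk]
    rw [h1, List.take_append_of_le_length (by omega)]
  · have hx : (l ++ [x]).getD l.length 0 = x := by
      simp [List.getD_eq_getElem?_getD]
    have ht : (l ++ [x]).take (l.length + 1) = l ++ [x] := by
      apply List.take_of_length_le; simp
    simp only [List.countP_cons, List.countP_nil, hx, ht, List.count_append,
      List.count_singleton, beq_self_eq_true, if_true, Nat.zero_add, decide_eq_true_eq]

lemma pvCountQ_eq_sum (l : List Int) (c : Int → Nat) :
    pvCountQ l c = ∑ v ∈ l.toFinset, (l.count v - c v) := by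
  induction l using List.reverseRecOn with
  | nil => simp [pvCountQ_nil]
  | append_singleton l x ih =>
    rw [pvCountQ_append, ih, List.toFinset_append]
    simp only [List.toFinset_cons, List.toFinset_nil, insert_empty_eq,
      Finset.union_singleton]
    by_cases hx : x ∈ l.toFinset
    · rw [Finset.insert_eq_self.mpr hx]
      have hs : ∑ v ∈ l.toFinset.erase x, ((l ++ [x]).count v - c v)
          = ∑ v ∈ l.toFinset.erase x, (l.count v - c v) := by
        apply Finset.sum_congr rfl
        intro v hv
        have hne : x ≠ v := fun h => (Finset.mem_erase.mp hv).1 h.symm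
        simp [List.count_append, hne]
      rw [← Finset.add_sum_erase _ _ hx, ← Finset.add_sum_erase _ _ hx, hs,
        List.count_append, List.count_singleton]
      simp only [beq_self_eq_true, if_true]
      split_ifs <;> omega
    · have hxl : x ∉ l := fun h => hx (List.mem_toFinset.mpr h)
      rw [Finset.sum_insert hx]
      have hs : ∑ v ∈ l.toFinset, ((l ++ [x]).count v - c v)
          = ∑ v ∈ l.toFinset, (l.count v - c v) := by
        apply Finset.sum_congr rfl
        intro v hv
        have hne : x ≠ v := fun h => hx (h ▸ hv)
        simp [List.count_append, hne]
      rw [hs, List.count_append, List.count_singleton]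
      simp only [beq_self_eq_true, if_true]
      have h0 : l.count x = 0 := List.count_eq_zero.mpr hxl
      rw [h0]
      split_ifs <;> omega

lemma pvRem_nil (b : List Int) : pvRem [] b = b := rfl

lemma pvRem_cons (y : Int) (a b : List Int) : pvRem (y :: a) b = pvRem a (b.erase y) := rfl

lemma pvRem_append_singleton (a b : List Int) (x : Int) :
    pvRem (a ++ [x]) b = (pvRem a b).erase x := by
  unfold pvRem; rw [List.foldl_append]; rfl

lemma pvRem_count (a : List Int) : ∀ (b : List Int) (v : Int),
    (pvRem a b).count v = b.count v - min (b.count v) (a.count v) := by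
  induction a with
  | nil => intro b v; simp [pvRem_nil]
  | cons y a ih =>
    intro b v
    rw [pvRem_cons, ih, List.count_erase, List.count_cons]
    by_cases h : y = v
    · subst h; simp; omega
    · simp [h]

lemma pvRem_sublist (a : List Int) : ∀ b : List Int, (pvRem a b).Sublist b := by
  induction a with
  | nil => intro b; simp [pvRem_nil]
  | cons y a ih =>
    intro b
    rw [pvRem_cons]
    exact (ih (b.erase y)).trans (List.erase_sublist)

lemma pvRem_length (a b : List Int) :
    (pvRem a b).length = ∑ v ∈ b.toFinset, (b.count v - min (b.count v) (a.count v)) := by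
  have h1 : (pvRem a b).length = ∑ v ∈ (pvRem a b).toFinset, (pvRem a b).count v := by
    simp
  have h2 : ∑ v ∈ (pvRem a b).toFinset, (pvRem a b).count v
      = ∑ v ∈ b.toFinset, (pvRem a b).count v := by
    apply Finset.sum_subset
    · intro v hv
      exact List.mem_toFinset.mpr ((pvRem_sublist a b).subset (List.mem_toFinset.mp hv))
    · intro v _ hv
      exact List.count_eq_zero.mpr (fun h => hv (List.mem_toFinset.mpr h))
  rw [h1, h2]
  exact Finset.sum_congr rfl (fun v _ => pvRem_count a b v)

lemma pvB_loop (a : List Int) (b : List Int) :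
    a.foldl
      (fun (st : Int × List Int) x =>
        match PySem.List.remove? st.2 x with
        | some b' => (st.1, b')
        | none => (st.1 + 1, st.2))
      (0, b)
    = ((pvCountQ a (fun v => b.count v) : Int), pvRem a b) := by
  induction a using List.reverseRecOn with
  | nil => simp [pvCountQ_nil, pvRem_nil]
  | append_singleton a x ih =>
    rw [List.foldl_append, ih, List.foldl_cons, List.foldl_nil,
      pvCountQ_append, pvRem_append_singleton]
    by_cases hx : x ∈ pvRem a b
    · rw [PySem.List.remove?_eq_some_erase _ _ hx]
      have hc : 0 < (pvRem a b).count x := List.count_pos_iff.mpr hx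
      rw [pvRem_count] at hc
      have hge : ¬ (b.count x < a.count x + 1) := by omega
      simp [hge]
    · rw [(PySem.List.remove?_eq_none_iff (pvRem a b) x).mpr hx]
      have hc : (pvRem a b).count x = 0 := List.count_eq_zero.mpr hx
      rw [pvRem_count] at hc
      have hlt : b.count x < a.count x + 1 := by omega
      rw [List.erase_of_not_mem hx]
      simp [hlt]

-- one of A's index loops equals append of the filtered prefix-dominant indices
lemma pvLoopA (l other : List Int) (u0 : List Int) :
    (PySem.List.pyRange 0 (PySem.List.len l) 1).foldl
      (fun u i =>
        if PySem.List.count (PySem.List.slice l none (some (i + 1))) (PySem.List.pyGetD l i 0) >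
             PySem.List.count other (PySem.List.pyGetD l i 0)
        then u ++ [PySem.List.pyGetD l i 0] else u) u0
    = u0 ++ ((List.range l.length).filter
        (fun k => decide ((fun v => other.count v) (l.getD k 0) < (l.take (k + 1)).count (l.getD k 0)))).map
        (fun k => l.getD k 0) := by
  rw [PySem.List.len_eq, PySem.List.pyRange_zero_natCast, List.foldl_map]
  have hbody : ∀ (u : List Int) (k : Nat),
      (if PySem.List.count (PySem.List.slice l none (some ((k : Int) + 1))) (PySem.List.pyGetD l (k : Int) 0) >
             PySem.List.count other (PySem.List.pyGetD l (k : Int) 0)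
        then u ++ [PySem.List.pyGetD l (k : Int) 0] else u)
      = (if (fun v => other.count v) (l.getD k 0) < (l.take (k + 1)).count (l.getD k 0)
        then u ++ [l.getD k 0] else u) := by
    intro u k
    have hg : PySem.List.pyGetD l (k : Int) 0 = l.getD k 0 := PySem.List.pyGetD_natCast l k 0
    have hs : PySem.List.slice l none (some ((k : Int) + 1)) = l.take (k + 1) := by
      rw [PySem.List.slice_to l (by positivity)]
      have ht : ((k : Int) + 1).toNat = k + 1 := by omega
      rw [ht]
    rw [hg, hs]
    simp [PySem.List.count_eq]
  calc (List.range l.length).foldl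
        (fun u (k : Nat) =>
          if PySem.List.count (PySem.List.slice l none (some ((k : Int) + 1))) (PySem.List.pyGetD l (k : Int) 0) >
               PySem.List.count other (PySem.List.pyGetD l (k : Int) 0)
          then u ++ [PySem.List.pyGetD l (k : Int) 0] else u) u0
      = (List.range l.length).foldl
        (fun u k =>
          if (fun v => other.count v) (l.getD k 0) < (l.take (k + 1)).count (l.getD k 0)
          then u ++ [l.getD k 0] else u) u0 :=
        PySem.List.foldl_congr_mem _ _ _ _ (fun u k _ => hbody u k)
    _ = u0 ++ _ := PySem.List.foldl_append_ite _ _ _ _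

lemma portA_eq (a b : List Int) :
    rm_common a b
      = ((pvCountQ a (fun v => b.count v) : Int)) + ((pvCountQ b (fun v => a.count v) : Int)) := by
  unfold rm_common
  rw [pvLoopA a b [], pvLoopA b a, PySem.List.len_eq]
  simp only [pvCountQ, List.countP_eq_length_filter, List.nil_append, List.length_append,
    List.length_map]
  push_cast
  ring

-- ===== VERDICT (by name: the statement is the Claim_ definition above) =====
theorem rm_common_spec : Claim_equal_rm_common := by
  intro arra arrb _
  unfold Spec_rm_common rm_common_alt
  rw [pvB_loop, portA_eq]
  simp only [PySem.List.len_eq]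
  rw [pvRem_length]
  have hsum : ∑ v ∈ arrb.toFinset, (arrb.count v - min (arrb.count v) (arra.count v))
      = ∑ v ∈ arrb.toFinset, (arrb.count v - arra.count v) :=
    Finset.sum_congr rfl (fun v _ => by omega)
  rw [hsum, ← pvCountQ_eq_sum]
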